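-- pv_equiv track=rewrite | github.com/gilad-moskowitz/SylverCoinage | testingPackage/newBestBot.py | coverRelations
-- ===== SOURCE A (Python) =====
-- def coverRelations(gap):
--     linComb = [i for i in range(0, max(gap) + 1) if i not in gap]
--     dictionary = {};
--     for i in range(0, len(gap)):
--         covers = []
--         for j in range(i + 1, len(gap)):
--             for k in range(0, len(linComb)):
--                 if(gap[j] - linComb[k] < gap[i]):
--                     break
--                 if(((gap[j] - linComb[k]) > 0) and ((gap[j] - linComb[k])%gap[i] == 0)):
--                     covers.append(gap[j])
--                     break
--         dictionary[gap[i]] = covers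
--     return dictionary
-- ===== SOURCE B (Python) =====
-- def coverRelations(gap):
--     M = max(gap)
--     gapset = set(gap)
--     nonGap = [c for c in range(M + 1) if c not in gapset]
--     result = {}
--     for i in range(len(gap)):
--         g = abs(gap[i])
--         minC = {}
--         for c in nonGap:
--             r = c % g
--             if r not in minC:
--                 minC[r] = c
--         covers = []
--         for j in range(i + 1, len(gap)):
--             r = gap[j] % g
--             if r in minC and minC[r] <= gap[j] - g:
--                 covers.append(gap[j])
--         result[gap[i]] = covers
--     return result
-- ===== Notes on version B (the rewrite author's own statement) =====
-- stated objective: faster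
-- what changed: Instead of scanning the whole linComb list for every pair (i,j), B precomputes, once per i, the minimum non-gap value of each residue class mod |gap[i]|, so each pair (i,j) is decided by one dictionary lookup and one comparison.
-- outside the precondition, e.g. on coverRelations([5, 0]): A returns {5: [], 0: []}, B raises ZeroDivisionError
import Mathlib
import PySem

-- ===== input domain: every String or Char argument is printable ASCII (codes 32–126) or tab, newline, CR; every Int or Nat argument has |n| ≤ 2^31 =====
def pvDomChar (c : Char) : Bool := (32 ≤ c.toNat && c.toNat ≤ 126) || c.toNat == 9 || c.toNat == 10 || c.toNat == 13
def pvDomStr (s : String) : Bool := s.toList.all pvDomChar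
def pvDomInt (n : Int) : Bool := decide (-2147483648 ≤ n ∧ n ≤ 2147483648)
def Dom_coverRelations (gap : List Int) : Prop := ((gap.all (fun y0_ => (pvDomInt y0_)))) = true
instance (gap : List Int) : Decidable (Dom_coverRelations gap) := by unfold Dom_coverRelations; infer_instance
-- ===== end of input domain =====

-- B replaces A's per-pair scan of the whole linComb list by a per-i dictionary of the minimum
-- non-gap value in each residue class mod |gap[i]|, deciding each pair by one lookup (objective: faster).

-- ===== PORT A =====
-- A's innermost k-loop with its two breaks: true iff the loop appends gap[j]
def pvInnerA (gi gj : Int) : List Int → Bool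
  | [] => false
  | c :: cs =>
    if gj - c < gi then false
    else if 0 < gj - c ∧ PySem.Int.mod (gj - c) gi = 0 then true
    else pvInnerA gi gj cs

-- A's j-loop: the covers list built for index i
def pvCoversListA (gap linComb : List Int) (i gi : Int) : List Int :=
  (PySem.List.pyRange (i + 1) (gap.length : Int) 1).foldl (fun cov j =>
    if pvInnerA gi (PySem.List.pyGetD gap j 0) linComb
    then cov ++ [PySem.List.pyGetD gap j 0] else cov) []

-- A's i-loop building the result dict (linComb already computed)
def pvBodyA (gap linComb : List Int) : List (Int × List Int) :=
  ((PySem.List.pyRange 0 (gap.length : Int) 1).foldl (fun d i =>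
    d.insert (PySem.List.pyGetD gap i 0)
      (pvCoversListA gap linComb i (PySem.List.pyGetD gap i 0)))
    PySem.Dict.empty).items

def coverRelations (gap : List Int) : List (Int × List Int) :=
  match PySem.List.max? gap (fun x => x) with
  | none => []   -- Python: max([]) raises ValueError; outside Pre_
  | some m =>
    pvBodyA gap ((PySem.List.pyRange 0 (m + 1) 1).filter (fun v => !(gap.contains v)))

-- ===== PORT B =====
-- minC: first (= least, since nonGap is increasing) non-gap value of each residue class mod g
def pvMinC (g : Int) (nonGap : List Int) : PySem.Dict Int Int :=
  nonGap.foldl (fun mC c =>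
    if mC.contains (PySem.Int.mod c g) then mC else mC.insert (PySem.Int.mod c g) c)
    PySem.Dict.empty

-- B's pair test: 'r in minC and minC[r] <= gap[j] - g'
def pvCoversB (g gj : Int) (minC : PySem.Dict Int Int) : Bool :=
  match minC.get? (PySem.Int.mod gj g) with
  | some c => decide (c ≤ gj - g)
  | none => false

-- B's j-loop: the covers list built for index i (minC computed once, before the loop)
def pvCoversListB (gap : List Int) (i g : Int) (minC : PySem.Dict Int Int) : List Int :=
  (PySem.List.pyRange (i + 1) (gap.length : Int) 1).foldl (fun cov j =>
    if pvCoversB g (PySem.List.pyGetD gap j 0) minC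
    then cov ++ [PySem.List.pyGetD gap j 0] else cov) []

-- B's i-loop building the result dict (nonGap already computed)
def pvBodyB (gap nonGap : List Int) : List (Int × List Int) :=
  ((PySem.List.pyRange 0 (gap.length : Int) 1).foldl (fun d i =>
    d.insert (PySem.List.pyGetD gap i 0)
      (pvCoversListB gap i |PySem.List.pyGetD gap i 0|
        (pvMinC |PySem.List.pyGetD gap i 0| nonGap)))
    PySem.Dict.empty).items

def coverRelations_alt (gap : List Int) : List (Int × List Int) :=
  match PySem.List.max? gap (fun x => x) with
  | none => []   -- Source B: max([]) raises ValueError; outside Pre_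
  | some m =>
    pvBodyB gap ((PySem.List.pyRange 0 (m + 1) 1).filter
      (fun c => !(PySem.Set.contains (PySem.Set.ofList gap) c)))

-- ===== PRECONDITION & SPEC =====
-- Pre_ excludes the empty list (A's max([]) raises ValueError) and lists containing 0, on
-- which A's '% gap[i]' raises ZeroDivisionError whenever any later element exceeds the least
-- non-gap value (and B's '% 0' likewise raises); on the remaining degenerate 0-inputs A still
-- returns, see claim cites.
def Pre_coverRelations (gap : List Int) : Prop := gap ≠ [] ∧ (0 : Int) ∉ gap
instance (gap : List Int) : Decidable (Pre_coverRelations gap) := by unfold Pre_coverRelations; infer_instance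
def pvWitness_coverRelations : List Int := [3, 7, 5]

def Spec_coverRelations (gap : List Int) (out : List (Int × List Int)) : Prop := out = coverRelations_alt gap
instance (gap : List Int) (out : List (Int × List Int)) : Decidable (Spec_coverRelations gap out) := by unfold Spec_coverRelations; infer_instance

-- ===== CLAIM (what is proved, stated in full; the proofs are below) =====
def Claim_equal_coverRelations : Prop := ∀ (gap : List Int), Dom_coverRelations gap → Pre_coverRelations gap → Spec_coverRelations gap (coverRelations gap)

-- ===== LEMMAS AND PROOFS =====

-- get? of the pvMinC fold: first element of the residue class in the scanned list
theorem pvMinC_get_aux (g r : Int) (l : List Int) (m : PySem.Dict Int Int) :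
    ((l.foldl (fun mC c =>
      if mC.contains (PySem.Int.mod c g) then mC else mC.insert (PySem.Int.mod c g) c) m).get? r)
    = (m.get? r).or ((l.filter (fun c => PySem.Int.mod c g == r)).head?) := by
  induction l generalizing m with
  | nil => simp
  | cons c cs ih =>
    simp only [List.foldl_cons, List.filter_cons]
    by_cases hc : m.contains (PySem.Int.mod c g)
    · rw [if_pos hc, ih]
      by_cases hr : PySem.Int.mod c g = r
      · have hv : ∃ v, m.get? r = some v := by
          have := PySem.Dict.contains_eq_isSome_get? (d := m) (k := r)
          rw [hr] at hc
          rw [hc] at this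
          exact Option.isSome_iff_exists.mp this.symm
        rcases hv with ⟨v, hv⟩
        simp [hv, hr]
      · simp [hr]
    · rw [if_neg hc, ih]
      by_cases hr : PySem.Int.mod c g = r
      · subst hr
        have h1 : (m.insert (PySem.Int.mod c g) c).get? (PySem.Int.mod c g) = some c :=
          PySem.Dict.get?_insert_self m _ c
        have h2 : m.get? (PySem.Int.mod c g) = none := by
          rw [PySem.Dict.get?_eq_none_iff_contains]
          simpa using hc
        simp [h1, h2]
      · have h1 : (m.insert (PySem.Int.mod c g) c).get? r = m.get? r :=
          PySem.Dict.get?_insert_of_ne m c (fun h => hr h.symm)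
        simp [h1, hr]

theorem pvMinC_get (g r : Int) (l : List Int) :
    (pvMinC g l).get? r = (l.filter (fun c => PySem.Int.mod c g == r)).head? := by
  rw [pvMinC, pvMinC_get_aux]
  simp

-- A's inner loop over a strictly increasing list, characterised existentially
theorem pvInnerA_iff (gi gj : Int) (l : List Int) (hs : l.Pairwise (· < ·)) :
    pvInnerA gi gj l = true ↔
      ∃ c ∈ l, gi ≤ gj - c ∧ 0 < gj - c ∧ PySem.Int.mod (gj - c) gi = 0 := by
  induction l with
  | nil => simp [pvInnerA]
  | cons c cs ih =>
    rcases List.pairwise_cons.mp hs with ⟨hlt, hs'⟩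
    rw [pvInnerA]
    split_ifs with h1 h2
    · simp only [false_iff]
      rintro ⟨c', hc', hge, -, -⟩
      rcases List.mem_cons.mp hc' with rfl | hmem
      · omega
      · have := hlt c' hmem; omega
    · simp only [true_iff]
      exact ⟨c, List.mem_cons_self, by omega, h2.1, h2.2⟩
    · rw [ih hs']
      constructor
      · rintro ⟨c', hc', h⟩; exact ⟨c', List.mem_cons_of_mem c hc', h⟩
      · rintro ⟨c', hc', hge, hpos, hmod⟩
        rcases List.mem_cons.mp hc' with rfl | hmem
        · exact absurd ⟨hpos, hmod⟩ h2
        · exact ⟨c', hmem, hge, hpos, hmod⟩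

-- B's pair test over a strictly increasing list, characterised existentially
theorem pvCoversB_iff (g gj : Int) (l : List Int) (hs : l.Pairwise (· < ·)) :
    pvCoversB g gj (pvMinC g l) = true ↔
      ∃ c ∈ l, PySem.Int.mod c g = PySem.Int.mod gj g ∧ c ≤ gj - g := by
  rw [pvCoversB, pvMinC_get]
  constructor
  · intro h
    cases hh : (l.filter (fun c => PySem.Int.mod c g == PySem.Int.mod gj g)).head? with
    | none => rw [hh] at h; simp at h
    | some c =>
      rw [hh] at h
      have hle : c ≤ gj - g := of_decide_eq_true h
      have hmemf : c ∈ l.filter (fun c => PySem.Int.mod c g == PySem.Int.mod gj g) :=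
        List.mem_of_mem_head? hh
      have := List.mem_filter.mp hmemf
      exact ⟨c, this.1, by simpa using this.2, hle⟩
  · rintro ⟨c, hc, hres, hle⟩
    have hmemf : c ∈ l.filter (fun x => PySem.Int.mod x g == PySem.Int.mod gj g) :=
      List.mem_filter.mpr ⟨hc, by simpa using hres⟩
    have hsf : (l.filter (fun x => PySem.Int.mod x g == PySem.Int.mod gj g)).Pairwise (· < ·) :=
      hs.filter _
    cases hh : (l.filter (fun x => PySem.Int.mod x g == PySem.Int.mod gj g)).head? with
    | none =>
      rw [List.head?_eq_none_iff] at hh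
      rw [hh] at hmemf; simp at hmemf
    | some c0 =>
      have hc0 : c0 ≤ c := by
        cases hl : l.filter (fun x => PySem.Int.mod x g == PySem.Int.mod gj g) with
        | nil => rw [hl] at hmemf; simp at hmemf
        | cons a t =>
          rw [hl] at hh hmemf hsf
          simp only [List.head?_cons, Option.some.injEq] at hh
          subst hh
          rcases List.mem_cons.mp hmemf with rfl | hmem
          · exact le_refl c
          · exact le_of_lt ((List.pairwise_cons.mp hsf).1 c hmem)
      show decide (c0 ≤ gj - g) = true
      simp only [decide_eq_true_eq]
      omega

-- the arithmetic core: A's pair condition equals B's, for gi ≠ 0 and g = |gi|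
theorem pair_cond_iff (gi gj c : Int) (hgi : gi ≠ 0) :
    (gi ≤ gj - c ∧ 0 < gj - c ∧ PySem.Int.mod (gj - c) gi = 0) ↔
      (PySem.Int.mod c |gi| = PySem.Int.mod gj |gi| ∧ c ≤ gj - |gi|) := by
  have hg : 0 < |gi| := abs_pos.mpr hgi
  have hmc := PySem.Int.mod_eq_emod_of_pos (a := c) hg
  have hmj := PySem.Int.mod_eq_emod_of_pos (a := gj) hg
  rw [PySem.Int.mod_eq_zero_iff_dvd, hmc, hmj]
  have hres : (c % |gi| = gj % |gi|) ↔ |gi| ∣ (gj - c) := by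
    rw [Int.emod_eq_emod_iff_emod_sub_eq_zero, PySem.Int.emod_eq_zero_iff_dvd, dvd_sub_comm]
  constructor
  · rintro ⟨h1, h2, h3⟩
    have hdvd : |gi| ∣ gj - c := (abs_dvd gi (gj - c)).mpr h3
    have hle := Int.le_of_dvd h2 hdvd
    exact ⟨hres.mpr hdvd, by omega⟩
  · rintro ⟨h1, h2⟩
    have hdvd := hres.mp h1
    have h3 : gi ∣ gj - c := (abs_dvd gi (gj - c)).mp hdvd
    have hle : gi ≤ |gi| := le_abs_self gi
    exact ⟨by omega, by omega, h3⟩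

-- the two pair tests agree on a strictly increasing candidate list
theorem pvInner_eq_pvCoversB (gi gj : Int) (hgi : gi ≠ 0) (l : List Int)
    (hs : l.Pairwise (· < ·)) :
    pvInnerA gi gj l = pvCoversB |gi| gj (pvMinC |gi| l) := by
  rw [Bool.eq_iff_iff, pvInnerA_iff gi gj l hs, pvCoversB_iff _ gj l hs]
  constructor
  · rintro ⟨c, hc, h⟩; exact ⟨c, hc, (pair_cond_iff gi gj c hgi).mp h⟩
  · rintro ⟨c, hc, h⟩; exact ⟨c, hc, (pair_cond_iff gi gj c hgi).mpr h⟩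

-- the two candidate lists are the same list
theorem filter_nonGap_eq (gap : List Int) (m : Int) :
    (PySem.List.pyRange 0 (m + 1) 1).filter
        (fun c => !(PySem.Set.contains (PySem.Set.ofList gap) c))
      = (PySem.List.pyRange 0 (m + 1) 1).filter (fun v => !(gap.contains v)) := by
  apply List.filter_congr
  intro c _
  by_cases h : c ∈ gap <;>
    simp [h, PySem.Set.contains_eq_listContains, PySem.Set.mem_ofList]

-- ===== VERDICT (by name: the statement is the Claim_ definition above) =====
theorem coverRelations_spec : Claim_equal_coverRelations := by
  intro gap _ hpre
  unfold Spec_coverRelations coverRelations coverRelations_alt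
  cases hm : PySem.List.max? gap (fun x => x) with
  | none => rfl
  | some m =>
    show pvBodyA gap ((PySem.List.pyRange 0 (m + 1) 1).filter (fun v => !(gap.contains v)))
        = pvBodyB gap ((PySem.List.pyRange 0 (m + 1) 1).filter
            (fun c => !(PySem.Set.contains (PySem.Set.ofList gap) c)))
    rw [filter_nonGap_eq gap m, pvBodyA, pvBodyB]
    congr 1
    apply PySem.List.foldl_congr_mem
    intro d i hi
    rcases (PySem.List.mem_pyRange_one).mp hi with ⟨hi0, hilen⟩
    have hmem : PySem.List.pyGetD gap i 0 ∈ gap := by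
      rw [PySem.List.pyGetD_eq_getElem gap (0:Int) hi0 hilen]
      exact List.getElem_mem _
    have hgi : PySem.List.pyGetD gap i 0 ≠ 0 := fun h => hpre.2 (h ▸ hmem)
    congr 1
    rw [pvCoversListA, pvCoversListB]
    apply PySem.List.foldl_congr_mem
    intro cov j hj
    rw [pvInner_eq_pvCoversB _ _ hgi _
      ((PySem.List.pairwise_lt_pyRange_one 0 (m + 1)).filter _)]
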